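-- pv_equiv track=rewrite | github.com/ninadm/Coding2023 | Python/leetcode/Graphs/CitiesWithinAThreshold.py | printDFS
-- ===== SOURCE A (Python) =====
-- def printDFS(n, edges, start, thresh):
--
--     graph = {i: [] for i in range(n)}
--     for edge in edges:
--         graph[edge[0]].append(edge[1])
--         graph[edge[1]].append(edge[0])
--
--     def dfs(curr, currLength):
--         if curr in visited:
--             return
--         visited.add(curr)
--         if currLength <= thresh:
--             ans[start].add(curr)
--         for n in graph[curr]:
--             if n not in visited:
--                 dfs(n, currLength + 1)
--
--     ans = {start: set()}
--     visited = set()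
--     dfs(start, 0)
--     return ans
-- ===== SOURCE B (Python) =====
-- def printDFS(n, edges, start, thresh):
--
--     graph = {i: [] for i in range(n)}
--     for edge in edges:
--         graph[edge[0]].append(edge[1])
--         graph[edge[1]].append(edge[0])
--
--     ans = {start: set()}
--     visited = set()
--     stack = [(start, 0)]
--     while stack:
--         curr, currLength = stack.pop()
--         if curr in visited:
--             continue
--         visited.add(curr)
--         if currLength <= thresh:
--             ans[start].add(curr)
--         for nb in reversed(graph[curr]):
--             stack.append((nb, currLength + 1))
--     return ans
-- ===== Notes on version B (the rewrite author's own statement) =====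
-- stated objective: alternative
-- what changed: Replaces the recursive dfs helper with an iterative traversal over an explicit stack (mark-on-pop, neighbors pushed in reverse), reproducing the same pre-order visit depths without recursion.
import Mathlib
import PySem

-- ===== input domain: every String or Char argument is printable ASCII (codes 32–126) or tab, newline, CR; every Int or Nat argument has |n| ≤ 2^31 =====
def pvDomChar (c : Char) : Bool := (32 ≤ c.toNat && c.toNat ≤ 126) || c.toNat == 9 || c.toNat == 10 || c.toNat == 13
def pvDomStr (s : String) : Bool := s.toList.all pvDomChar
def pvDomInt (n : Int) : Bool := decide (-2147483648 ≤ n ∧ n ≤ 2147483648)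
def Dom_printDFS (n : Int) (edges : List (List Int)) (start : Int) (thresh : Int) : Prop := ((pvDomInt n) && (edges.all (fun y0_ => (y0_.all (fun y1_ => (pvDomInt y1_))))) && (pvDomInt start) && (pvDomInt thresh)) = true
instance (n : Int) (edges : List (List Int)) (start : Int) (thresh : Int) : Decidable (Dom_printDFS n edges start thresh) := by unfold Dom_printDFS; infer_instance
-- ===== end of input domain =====

-- B replaces A's recursive dfs helper by an iterative traversal over an explicit stack
-- (mark-on-pop, neighbors pushed in reverse); same visit order and depths, no recursion.

-- State threaded through both traversals: (visited, ans), exactly A's and B's two mutable sets/dicts.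
abbrev pvState : Type := PySem.Set Int × PySem.Dict Int (PySem.Set Int)

-- graph = {i: [] for i in range(n)}; for edge in edges: graph[edge[0]].append(edge[1]); graph[edge[1]].append(edge[0])
-- (identical lines in A and in B, transliterated once; Dict.modify is exact under Pre_, where the keys exist)
def pvBuildGraph (n : Int) (edges : List (List Int)) : PySem.Dict Int (List Int) :=
  let graph0 := (PySem.List.pyRange 0 n 1).foldl (fun d i => d.insert i ([] : List Int)) PySem.Dict.empty
  edges.foldl (fun d e =>
    let d1 := d.modify ((PySem.List.pyGet? e 0).getD 0) [] (fun l => l ++ [(PySem.List.pyGet? e 1).getD 0])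
    d1.modify ((PySem.List.pyGet? e 1).getD 0) [] (fun l => l ++ [(PySem.List.pyGet? e 0).getD 0])) graph0

-- ===== PORT A =====
-- A's recursive dfs; the fuel argument is a totality device only (printDFS passes enough for every input).
def pvDfsA (g : PySem.Dict Int (List Int)) (start thresh : Int) : Nat → Int → Int → pvState → pvState
  | 0, _, _, s => s
  | f + 1, c, L, s =>
    if PySem.Set.contains s.1 c then s
    else
      let vis := PySem.Set.add s.1 c
      let ans := if L ≤ thresh then s.2.modify start PySem.Set.empty (fun t => PySem.Set.add t c) else s.2
      (g.getD c []).foldl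
        (fun s' nb => if PySem.Set.contains s'.1 nb then s' else pvDfsA g start thresh f nb (L + 1) s')
        (vis, ans)

def printDFS (n : Int) (edges : List (List Int)) (start : Int) (thresh : Int) : List (Int × List Int) :=
  let graph := pvBuildGraph n edges
  let s := pvDfsA graph start thresh (graph.keys.length + 2) start 0
    (PySem.Set.empty, PySem.Dict.insert PySem.Dict.empty start PySem.Set.empty)
  s.2.items

-- ===== PORT B =====
-- Termination measure pieces for the stack loop (totality device only).
def pvUnvisited (g : PySem.Dict Int (List Int)) (vis : PySem.Set Int) : Nat :=
  (g.keys.filter (fun k => !(PySem.Set.contains vis k))).length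

def pvBound (g : PySem.Dict Int (List Int)) : Nat := (g.values.map List.length).sum + 1

lemma pvPushLen (l : List Int) (L : Int) (st : List (Int × Int)) :
    (l.foldl (fun acc nb => (nb, L) :: acc) st).length = l.length + st.length := by
  induction l generalizing st with
  | nil => simp
  | cons x t ih =>
    simp only [List.foldl_cons]
    rw [ih]
    simp
    omega

lemma pvUnvisited_mono (g : PySem.Dict Int (List Int)) (vis vis' : PySem.Set Int)
    (h : ∀ x, PySem.Set.contains vis x = true → PySem.Set.contains vis' x = true) :
    pvUnvisited g vis' ≤ pvUnvisited g vis := by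
  apply List.Sublist.length_le
  apply List.monotone_filter_right
  intro a ha
  simp only [Bool.not_eq_true'] at ha ⊢
  by_contra hb
  have h2 := h a (by simpa using hb)
  rw [h2] at ha
  exact Bool.noConfusion ha

lemma pvContains_add_mono (vis : PySem.Set Int) (c x : Int)
    (h : PySem.Set.contains vis x = true) :
    PySem.Set.contains (PySem.Set.add vis c) x = true := by
  simp [PySem.Set.add, PySem.Set.contains] at *
  split <;> simp_all

lemma pvUnvisited_add_le (g : PySem.Dict Int (List Int)) (vis : PySem.Set Int) (c : Int) :
    pvUnvisited g (PySem.Set.add vis c) ≤ pvUnvisited g vis :=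
  pvUnvisited_mono g vis _ (fun x hx => pvContains_add_mono vis c x hx)

lemma pvUnvisited_add_lt (g : PySem.Dict Int (List Int)) (vis : PySem.Set Int) (c : Int)
    (hc : g.contains c = true) (hv : PySem.Set.contains vis c = false) :
    pvUnvisited g (PySem.Set.add vis c) < pvUnvisited g vis := by
  have hsub : ((g.keys.filter (fun k => !(PySem.Set.contains (PySem.Set.add vis c) k)))).Sublist
      ((g.keys.filter (fun k => !(PySem.Set.contains vis k)))) := by
    apply List.monotone_filter_right
    intro a ha
    simp only [Bool.not_eq_true'] at ha ⊢
    by_contra hb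
    have h2 := pvContains_add_mono vis c a (by simpa using hb)
    rw [h2] at ha
    exact Bool.noConfusion ha
  rcases Nat.lt_or_ge (pvUnvisited g (PySem.Set.add vis c)) (pvUnvisited g vis) with h | h
  · exact h
  · exfalso
    have heq : (g.keys.filter (fun k => !(PySem.Set.contains (PySem.Set.add vis c) k)))
        = (g.keys.filter (fun k => !(PySem.Set.contains vis k))) :=
      hsub.eq_of_length (Nat.le_antisymm hsub.length_le h)
    have hck : c ∈ g.keys := (PySem.Dict.contains_iff_mem_keys g c).mp hc
    have hv' : c ∉ vis := by simpa using hv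
    have hmem : c ∈ g.keys.filter (fun k => !(PySem.Set.contains vis k)) := by
      simp [List.mem_filter, hck, hv']
    rw [← heq] at hmem
    have := (List.mem_filter.mp hmem).2
    simp at this

lemma pvAdjLen_lt (g : PySem.Dict Int (List Int)) (c : Int) (hc : g.contains c = true) :
    (g.getD c []).length < pvBound g := by
  have h1 : (g.get? c).isSome := by rw [← PySem.Dict.contains_eq_isSome_get?]; exact hc
  obtain ⟨v, hv⟩ := Option.isSome_iff_exists.mp h1
  have hval : v ∈ g.values := by
    have h2 := PySem.Dict.mem_items_of_get?_eq_some g hv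
    simp only [PySem.Dict.values]
    exact List.mem_map_of_mem (f := Prod.snd) h2
  have : v.length ∈ (g.values.map List.length) := List.mem_map_of_mem hval
  have hle : v.length ≤ (g.values.map List.length).sum := List.le_sum_of_mem this
  have : g.getD c [] = v := PySem.Dict.getD_of_get?_eq_some g [] hv
  rw [this]
  unfold pvBound; omega

-- B's while-loop over the explicit stack (top = head); the measure is a totality device only.
def pvLoopB (g : PySem.Dict Int (List Int)) (start thresh : Int) :
    List (Int × Int) → pvState → pvState
  | [], s => s
  | (c, L) :: st, s =>
    if PySem.Set.contains s.1 c then pvLoopB g start thresh st s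
    else
      let vis := PySem.Set.add s.1 c
      let ans := if L ≤ thresh then s.2.modify start PySem.Set.empty (fun t => PySem.Set.add t c) else s.2
      pvLoopB g start thresh
        ((g.getD c []).reverse.foldl (fun acc nb => (nb, L + 1) :: acc) st) (vis, ans)
  termination_by st s => st.length + pvUnvisited g s.1 * pvBound g
  decreasing_by
  · simp
  · rw [pvPushLen]
    simp only [List.length_reverse, List.length_cons]
    by_cases hgc : g.contains c = true
    · have h1 := pvUnvisited_add_lt g s.1 c hgc (by simpa using ‹¬PySem.Set.contains s.1 c = true›)
      have h2 := pvAdjLen_lt g c hgc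
      have h3 : (pvUnvisited g (PySem.Set.add s.1 c) + 1) * pvBound g ≤ pvUnvisited g s.1 * pvBound g :=
        Nat.mul_le_mul_right _ h1
      rw [Nat.add_mul] at h3
      omega
    · have hnil : g.getD c [] = [] :=
        PySem.Dict.getD_of_not_contains g [] (by simpa using hgc)
      have h1 := pvUnvisited_add_le g s.1 c
      have h3 : pvUnvisited g (PySem.Set.add s.1 c) * pvBound g ≤ pvUnvisited g s.1 * pvBound g :=
        Nat.mul_le_mul_right _ h1
      rw [hnil]
      simp; omega

def printDFS_alt (n : Int) (edges : List (List Int)) (start : Int) (thresh : Int) : List (Int × List Int) :=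
  let graph := pvBuildGraph n edges
  let s := pvLoopB graph start thresh [(start, 0)]
    (PySem.Set.empty, PySem.Dict.insert PySem.Dict.empty start PySem.Set.empty)
  s.2.items

-- ===== PRECONDITION & SPEC =====
-- Pre_ excludes exactly the inputs where Python A raises: start outside range(n) (KeyError),
-- an edge of length < 2 (IndexError), or an edge endpoint outside range(n) (KeyError).
def Pre_printDFS (n : Int) (edges : List (List Int)) (start : Int) (thresh : Int) : Prop :=
  (0 ≤ start ∧ start < n) ∧
  ∀ e ∈ edges, 2 ≤ e.length ∧
    (0 ≤ e.getD 0 0 ∧ e.getD 0 0 < n) ∧ (0 ≤ e.getD 1 0 ∧ e.getD 1 0 < n)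
instance (n : Int) (edges : List (List Int)) (start : Int) (thresh : Int) : Decidable (Pre_printDFS n edges start thresh) := by unfold Pre_printDFS; infer_instance

def pvWitness_printDFS : Int × List (List Int) × Int × Int := (3, [[0, 1], [1, 2]], 0, 1)

def Spec_printDFS (n : Int) (edges : List (List Int)) (start : Int) (thresh : Int) (out : List (Int × List Int)) : Prop := out = printDFS_alt n edges start thresh
instance (n : Int) (edges : List (List Int)) (start : Int) (thresh : Int) (out : List (Int × List Int)) : Decidable (Spec_printDFS n edges start thresh out) := by unfold Spec_printDFS; infer_instance

-- ===== CLAIM (what is proved, stated in full; the proofs are below) =====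
def Claim_equal_printDFS : Prop := ∀ (n : Int) (edges : List (List Int)) (start : Int) (thresh : Int), Dom_printDFS n edges start thresh → Pre_printDFS n edges start thresh → Spec_printDFS n edges start thresh (printDFS n edges start thresh)

-- ===== LEMMAS AND PROOFS =====

lemma pvLoopB_nil (g : PySem.Dict Int (List Int)) (start thresh : Int) (s : pvState) :
    pvLoopB g start thresh [] s = s := by
  rw [pvLoopB]

lemma pvDfsA_visited (g : PySem.Dict Int (List Int)) (start thresh : Int) (f : Nat)
    (c L : Int) (s : pvState) (hc : PySem.Set.contains s.1 c = true) :
    pvDfsA g start thresh f c L s = s := by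
  cases f with
  | zero => rfl
  | succ f => rw [pvDfsA, if_pos hc]

lemma pvDfsA_contains_mono (g : PySem.Dict Int (List Int)) (start thresh : Int) :
    ∀ (f : Nat) (c L : Int) (s : pvState) (x : Int),
      PySem.Set.contains s.1 x = true →
      PySem.Set.contains (pvDfsA g start thresh f c L s).1 x = true := by
  intro f
  induction f with
  | zero => intro c L s x hx; exact hx
  | succ f ih =>
    intro c L s x hx
    rw [pvDfsA]
    by_cases hc : PySem.Set.contains s.1 c = true
    · rw [if_pos hc]; exact hx
    · rw [if_neg hc]
      simp only []
      have hstart : PySem.Set.contains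
          ((PySem.Set.add s.1 c,
            if L ≤ thresh then s.2.modify start PySem.Set.empty (fun t => PySem.Set.add t c) else s.2) : pvState).1 x
          = true := pvContains_add_mono s.1 c x hx
      generalize ((PySem.Set.add s.1 c,
        if L ≤ thresh then s.2.modify start PySem.Set.empty (fun t => PySem.Set.add t c) else s.2) : pvState) = s1 at hstart
      generalize g.getD c [] = l
      clear hc hx
      induction l generalizing s1 with
      | nil => exact hstart
      | cons nb t iht =>
        simp only [List.foldl_cons]
        by_cases hnb : PySem.Set.contains s1.1 nb = true
        · rw [if_pos hnb]; exact iht s1 hstart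
        · rw [if_neg hnb]
          exact iht _ (ih nb (L + 1) s1 x hstart)

lemma pvPushEq (l : List Int) (L : Int) (st : List (Int × Int)) :
    l.reverse.foldl (fun acc nb => (nb, L) :: acc) st = l.map (fun nb => (nb, L)) ++ st := by
  induction l generalizing st with
  | nil => simp
  | cons x t ih =>
    simp only [List.reverse_cons, List.foldl_append, List.foldl_cons, List.foldl_nil, List.map_cons]
    rw [ih]
    rfl

lemma pvMain (g : PySem.Dict Int (List Int)) (start thresh : Int) :
    ∀ (f : Nat) (s : pvState) (c L : Int) (st : List (Int × Int)),
      pvUnvisited g s.1 + 2 ≤ f →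
      pvLoopB g start thresh ((c, L) :: st) s
        = pvLoopB g start thresh st (pvDfsA g start thresh f c L s) := by
  intro f
  induction f with
  | zero => intro s c L st h; omega
  | succ f ih =>
    intro s c L st h
    rw [pvLoopB, pvDfsA]
    by_cases hc : PySem.Set.contains s.1 c = true
    · rw [if_pos hc, if_pos hc]
    · rw [if_neg hc, if_neg hc]
      simp only []
      rw [pvPushEq]
      generalize hs1 : ((PySem.Set.add s.1 c,
        if L ≤ thresh then s.2.modify start PySem.Set.empty (fun t => PySem.Set.add t c) else s.2) : pvState) = s1
      have hs1vis : s1.1 = PySem.Set.add s.1 c := by rw [← hs1]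
      rcases eq_or_ne (g.getD c []) [] with hl | hl
      · rw [hl]; simp
      · have hgc : g.contains c = true := by
          by_contra hb
          exact hl (PySem.Dict.getD_of_not_contains g [] (by simpa using hb))
        have hU : pvUnvisited g s1.1 + 2 ≤ f := by
          rw [hs1vis]
          have := pvUnvisited_add_lt g s.1 c hgc (by simpa using hc)
          omega
        generalize g.getD c [] = l at *
        clear hl hgc hs1 hs1vis hc
        induction l generalizing s1 with
        | nil => simp
        | cons nb t iht =>
          simp only [List.map_cons, List.cons_append, List.foldl_cons]
          rw [ih s1 nb (L + 1) (t.map (fun nb => (nb, L + 1)) ++ st) hU]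
          by_cases hnb : PySem.Set.contains s1.1 nb = true
          · rw [pvDfsA_visited g start thresh f nb (L + 1) s1 hnb, if_pos hnb]
            exact iht s1 hU
          · rw [if_neg hnb]
            apply iht
            have hmono : ∀ x, PySem.Set.contains s1.1 x = true →
                PySem.Set.contains (pvDfsA g start thresh f nb (L + 1) s1).1 x = true :=
              fun x hx => pvDfsA_contains_mono g start thresh f nb (L + 1) s1 x hx
            have := pvUnvisited_mono g s1.1 (pvDfsA g start thresh f nb (L + 1) s1).1 hmono
            omega

-- ===== VERDICT (by name: the statement is the Claim_ definition above) =====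
theorem printDFS_spec : Claim_equal_printDFS := by
  unfold Claim_equal_printDFS
  intro n edges start thresh _hdom _hpre
  unfold Spec_printDFS printDFS printDFS_alt
  simp only []
  rw [pvMain (pvBuildGraph n edges) start thresh ((pvBuildGraph n edges).keys.length + 2)
    (PySem.Set.empty, PySem.Dict.insert PySem.Dict.empty start PySem.Set.empty) start 0 []
    (by
      unfold pvUnvisited
      exact Nat.add_le_add_right (List.length_filter_le _ _) 2),
    pvLoopB_nil]
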